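-- pv_equiv track=rewrite | github.com/dietmarja/ECM | components/curriculum_generator/components/curriculum_builder_integrated.py | _sort_modules_by_learning_sequence
-- ===== SOURCE A (Python) =====
-- from typing import Dict, Any, List, Optional, Tuple
--
-- def _sort_modules_by_learning_sequence(modules: List[Dict]) -> List[Dict]:
--     """Sort modules by logical learning sequence (foundational -> advanced)"""
--
--     def get_module_priority(module):
--         title = module.get('title', '').lower()
--         description = module.get('description', '').lower()
--
--         # Foundational modules (priority 1)
--         if any(word in title for word in ['introduction', 'fundamentals', 'basics', 'principles']):
--             return 1
--
--         # Core modules (priority 2)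
--         if any(word in title for word in ['core', 'essential', 'foundations']):
--             return 2
--
--         # Applied modules (priority 3)
--         if any(word in title for word in ['applied', 'practical', 'implementation']):
--             return 3
--
--         # Advanced modules (priority 4)
--         if any(word in title for word in ['advanced', 'expert', 'specialized']):
--             return 4
--
--         # Default priority
--         return 3
--
--     return sorted(modules, key=get_module_priority)
-- ===== SOURCE B (Python) =====
-- from typing import Dict, Any, List, Optional, Tuple
--
-- PRIORITY_GROUPS = [
--     (1, ('introduction', 'fundamentals', 'basics', 'principles')),
--     (2, ('core', 'essential', 'foundations')),
--     (3, ('applied', 'practical', 'implementation')),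
--     (4, ('advanced', 'expert', 'specialized')),
-- ]
--
-- def _sort_modules_by_learning_sequence(modules: List[Dict]) -> List[Dict]:
--     """Bucket modules by learning-sequence priority (1-4) in one pass, then
--     concatenate the buckets in ascending priority order 1-4 (stable, same
--     result as the sorted() version)."""
--
--     def get_module_priority(module):
--         title = module.get('title', '').lower()
--         for priority, words in PRIORITY_GROUPS:
--             if any(word in title for word in words):
--                 return priority
--         return 3
--
--     buckets = {1: [], 2: [], 3: [], 4: []}
--     for module in modules:
--         buckets[get_module_priority(module)].append(module)
--     return buckets[1] + buckets[2] + buckets[3] + buckets[4]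
-- ===== Notes on version B (the rewrite author's own statement) =====
-- stated objective: alternative
-- what changed: Replaces the comparison-based sorted() call with a single-pass stable bucket distribution into four priority buckets concatenated in ascending order 1-4; the priority helper becomes a loop over a keyword-group table.
import Mathlib
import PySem

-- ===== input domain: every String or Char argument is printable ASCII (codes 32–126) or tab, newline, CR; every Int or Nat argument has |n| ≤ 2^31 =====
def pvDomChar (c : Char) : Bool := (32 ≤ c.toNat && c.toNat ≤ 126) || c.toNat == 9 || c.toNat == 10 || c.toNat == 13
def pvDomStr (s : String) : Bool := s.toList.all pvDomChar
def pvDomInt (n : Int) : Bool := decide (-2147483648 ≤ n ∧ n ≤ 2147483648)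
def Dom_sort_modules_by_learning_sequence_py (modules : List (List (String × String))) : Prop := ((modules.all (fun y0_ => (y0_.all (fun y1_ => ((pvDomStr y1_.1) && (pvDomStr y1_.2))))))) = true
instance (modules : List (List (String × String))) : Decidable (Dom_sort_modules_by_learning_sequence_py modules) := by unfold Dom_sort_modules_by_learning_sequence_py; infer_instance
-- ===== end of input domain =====

-- B replaces the sorted() call by a one-pass stable bucket distribution into the four
-- priority buckets, concatenated in order 1→4 (objective: alternative algorithm, same result).

-- ===== PORT A =====
-- A's inner get_module_priority: a chain of keyword tests
def pvPriority (module : List (String × String)) : Int :=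
  let title := PySem.Str.lower (PySem.Dict.getD ⟨module⟩ "title" "")
  let _description := PySem.Str.lower (PySem.Dict.getD ⟨module⟩ "description" "")
  if ["introduction", "fundamentals", "basics", "principles"].any (fun w => PySem.Str.isIn w title) then 1
  else if ["core", "essential", "foundations"].any (fun w => PySem.Str.isIn w title) then 2
  else if ["applied", "practical", "implementation"].any (fun w => PySem.Str.isIn w title) then 3
  else if ["advanced", "expert", "specialized"].any (fun w => PySem.Str.isIn w title) then 4
  else 3

def sort_modules_by_learning_sequence_py (modules : List (List (String × String))) : List (List (String × String)) :=
  PySem.List.sorted modules pvPriority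

-- ===== PORT B =====
-- B's PRIORITY_GROUPS table and its group-loop get_module_priority
def pvPriorityGroups : List (Int × List String) :=
  [(1, ["introduction", "fundamentals", "basics", "principles"]),
   (2, ["core", "essential", "foundations"]),
   (3, ["applied", "practical", "implementation"]),
   (4, ["advanced", "expert", "specialized"])]

def pvGroupScan (title : String) : List (Int × List String) → Int
  | [] => 3
  | (priority, words) :: rest =>
      if words.any (fun word => PySem.Str.isIn word title) then priority
      else pvGroupScan title rest

def pvPriorityAlt (module : List (String × String)) : Int :=
  pvGroupScan (PySem.Str.lower (PySem.Dict.getD ⟨module⟩ "title" "")) pvPriorityGroups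

-- one loop step: append the module to the bucket named by its priority
def pvBucketStep (st : List (List (String × String)) × List (List (String × String)) × List (List (String × String)) × List (List (String × String)))
    (m : List (String × String)) :
    List (List (String × String)) × List (List (String × String)) × List (List (String × String)) × List (List (String × String)) :=
  let p := pvPriorityAlt m
  if p = 1 then (st.1 ++ [m], st.2.1, st.2.2.1, st.2.2.2)
  else if p = 2 then (st.1, st.2.1 ++ [m], st.2.2.1, st.2.2.2)
  else if p = 3 then (st.1, st.2.1, st.2.2.1 ++ [m], st.2.2.2)
  else (st.1, st.2.1, st.2.2.1, st.2.2.2 ++ [m])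

def sort_modules_by_learning_sequence_py_alt (modules : List (List (String × String))) : List (List (String × String)) :=
  let st := modules.foldl pvBucketStep ([], [], [], [])
  st.1 ++ st.2.1 ++ st.2.2.1 ++ st.2.2.2

-- ===== PRECONDITION & SPEC =====
def Spec_sort_modules_by_learning_sequence_py (modules : List (List (String × String))) (out : List (List (String × String))) : Prop := out = sort_modules_by_learning_sequence_py_alt modules
instance (modules : List (List (String × String))) (out : List (List (String × String))) : Decidable (Spec_sort_modules_by_learning_sequence_py modules out) := by unfold Spec_sort_modules_by_learning_sequence_py; infer_instance

-- ===== CLAIM (what is proved, stated in full; the proofs are below) =====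
def Claim_equal_sort_modules_by_learning_sequence_py : Prop := ∀ (modules : List (List (String × String))), Dom_sort_modules_by_learning_sequence_py modules → Spec_sort_modules_by_learning_sequence_py modules (sort_modules_by_learning_sequence_py modules)

-- ===== LEMMAS AND PROOFS =====

-- the modules of xs whose priority is i, in order
def pvF (i : Int) (xs : List (List (String × String))) : List (List (String × String)) :=
  xs.filter (fun m => pvPriority m == i)

lemma pvF_nil (i : Int) : pvF i [] = [] := rfl

lemma pvF_cons (i : Int) (x : List (String × String)) (xs : List (List (String × String))) :
    pvF i (x :: xs) = if pvPriority x == i then x :: pvF i xs else pvF i xs := by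
  simp [pvF, List.filter_cons]

-- B's table-driven priority computes A's if-chain priority
lemma pvPriorityAlt_eq (m : List (String × String)) : pvPriorityAlt m = pvPriority m := by
  simp [pvPriorityAlt, pvPriorityGroups, pvGroupScan, pvPriority]

lemma pvPriority_mem (m : List (String × String)) :
    pvPriority m = 1 ∨ pvPriority m = 2 ∨ pvPriority m = 3 ∨ pvPriority m = 4 := by
  simp only [pvPriority]
  split_ifs <;> simp

-- inserting x into u ++ v places it exactly between them when u's keys are ≤ and v's keys are >
lemma pv_ins_mid (x : List (String × String)) (u v : List (List (String × String)))
    (hu : ∀ y ∈ u, ¬ pvPriority x < pvPriority y)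
    (hv : ∀ y ∈ v, pvPriority x < pvPriority y) :
    PySem.List.insertBy (fun a b => decide (pvPriority a < pvPriority b)) x (u ++ v) = u ++ x :: v := by
  induction u with
  | nil =>
    cases v with
    | nil => rfl
    | cons y ys =>
      have h := hv y (by simp)
      simp [PySem.List.insertBy, h]
  | cons a u ih =>
    have ha := hu a (by simp)
    simp only [List.cons_append, PySem.List.insertBy, decide_eq_true_eq, ha, if_false]
    simp [ih (fun y hy => hu y (by simp [hy]))]

lemma pv_foldl_ins (xs : List (List (String × String))) :
    ∀ (g1 g2 g3 g4 : List (List (String × String))),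
    (∀ y ∈ g1, pvPriority y = 1) → (∀ y ∈ g2, pvPriority y = 2) →
    (∀ y ∈ g3, pvPriority y = 3) → (∀ y ∈ g4, pvPriority y = 4) →
    xs.foldl (fun acc x => PySem.List.insertBy (fun a b => decide (pvPriority a < pvPriority b)) x acc)
        (g1 ++ g2 ++ g3 ++ g4)
      = (g1 ++ pvF 1 xs) ++ (g2 ++ pvF 2 xs) ++ (g3 ++ pvF 3 xs) ++ (g4 ++ pvF 4 xs) := by
  induction xs with
  | nil => intro g1 g2 g3 g4 _ _ _ _; simp [pvF_nil]
  | cons x xs ih =>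
    intro g1 g2 g3 g4 h1 h2 h3 h4
    simp only [List.foldl_cons]
    rcases pvPriority_mem x with hp | hp | hp | hp
    · have hins : PySem.List.insertBy (fun a b => decide (pvPriority a < pvPriority b)) x
          (g1 ++ g2 ++ g3 ++ g4) = g1 ++ (x :: (g2 ++ g3 ++ g4)) := by
        rw [show g1 ++ g2 ++ g3 ++ g4 = g1 ++ (g2 ++ g3 ++ g4) by simp [List.append_assoc]]
        exact pv_ins_mid x g1 (g2 ++ g3 ++ g4)
          (fun y hy => by rw [hp, h1 y hy]; omega)
          (fun y hy => by
            rw [hp]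
            rcases (by simpa using hy : y ∈ g2 ∨ y ∈ g3 ∨ y ∈ g4) with h | h | h
            · rw [h2 y h]; omega
            · rw [h3 y h]; omega
            · rw [h4 y h]; omega)
      rw [hins, show g1 ++ (x :: (g2 ++ g3 ++ g4)) = (g1 ++ [x]) ++ g2 ++ g3 ++ g4 by simp,
        ih (g1 ++ [x]) g2 g3 g4
          (fun y hy => by rcases (by simpa using hy : y ∈ g1 ∨ y = x) with h | h
                          · exact h1 y h
                          · rw [h, hp]) h2 h3 h4]
      simp [pvF_cons, hp, List.append_assoc]
    · have hins : PySem.List.insertBy (fun a b => decide (pvPriority a < pvPriority b)) x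
          (g1 ++ g2 ++ g3 ++ g4) = (g1 ++ g2) ++ (x :: (g3 ++ g4)) := by
        rw [show g1 ++ g2 ++ g3 ++ g4 = (g1 ++ g2) ++ (g3 ++ g4) by simp [List.append_assoc]]
        exact pv_ins_mid x (g1 ++ g2) (g3 ++ g4)
          (fun y hy => by
            rw [hp]
            rcases (by simpa using hy : y ∈ g1 ∨ y ∈ g2) with h | h
            · rw [h1 y h]; omega
            · rw [h2 y h]; omega)
          (fun y hy => by
            rw [hp]
            rcases (by simpa using hy : y ∈ g3 ∨ y ∈ g4) with h | h
            · rw [h3 y h]; omega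
            · rw [h4 y h]; omega)
      rw [hins, show (g1 ++ g2) ++ (x :: (g3 ++ g4)) = g1 ++ (g2 ++ [x]) ++ g3 ++ g4 by simp,
        ih g1 (g2 ++ [x]) g3 g4 h1
          (fun y hy => by rcases (by simpa using hy : y ∈ g2 ∨ y = x) with h | h
                          · exact h2 y h
                          · rw [h, hp]) h3 h4]
      simp [pvF_cons, hp, List.append_assoc]
    · have hins : PySem.List.insertBy (fun a b => decide (pvPriority a < pvPriority b)) x
          (g1 ++ g2 ++ g3 ++ g4) = (g1 ++ g2 ++ g3) ++ (x :: g4) := by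
        exact pv_ins_mid x (g1 ++ g2 ++ g3) g4
          (fun y hy => by
            rw [hp]
            simp only [List.mem_append] at hy
            rcases hy with (h | h) | h
            · rw [h1 y h]; omega
            · rw [h2 y h]; omega
            · rw [h3 y h]; omega)
          (fun y hy => by rw [hp, h4 y hy]; omega)
      rw [hins, show (g1 ++ g2 ++ g3) ++ (x :: g4) = g1 ++ g2 ++ (g3 ++ [x]) ++ g4 by simp,
        ih g1 g2 (g3 ++ [x]) g4 h1 h2
          (fun y hy => by rcases (by simpa using hy : y ∈ g3 ∨ y = x) with h | h
                          · exact h3 y h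
                          · rw [h, hp]) h4]
      simp [pvF_cons, hp, List.append_assoc]
    · have hins : PySem.List.insertBy (fun a b => decide (pvPriority a < pvPriority b)) x
          (g1 ++ g2 ++ g3 ++ g4) = (g1 ++ g2 ++ g3 ++ g4) ++ (x :: []) := by
        have h := pv_ins_mid x (g1 ++ g2 ++ g3 ++ g4) []
          (fun y hy => by
            rw [hp]
            simp only [List.mem_append] at hy
            rcases hy with ((h | h) | h) | h
            · rw [h1 y h]; omega
            · rw [h2 y h]; omega
            · rw [h3 y h]; omega
            · rw [h4 y h]; omega)
          (fun y hy => by simp at hy)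
        simpa using h
      rw [hins, show (g1 ++ g2 ++ g3 ++ g4) ++ (x :: []) = g1 ++ g2 ++ g3 ++ (g4 ++ [x]) by simp,
        ih g1 g2 g3 (g4 ++ [x]) h1 h2 h3
          (fun y hy => by rcases (by simpa using hy : y ∈ g4 ∨ y = x) with h | h
                          · exact h4 y h
                          · rw [h, hp])]
      simp [pvF_cons, hp, List.append_assoc]

lemma pv_foldl_buckets (xs : List (List (String × String))) :
    ∀ (b1 b2 b3 b4 : List (List (String × String))),
    xs.foldl pvBucketStep (b1, b2, b3, b4)
      = (b1 ++ pvF 1 xs, b2 ++ pvF 2 xs, b3 ++ pvF 3 xs, b4 ++ pvF 4 xs) := by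
  induction xs with
  | nil => intro b1 b2 b3 b4; simp [pvF_nil]
  | cons x xs ih =>
    intro b1 b2 b3 b4
    simp only [List.foldl_cons]
    rcases pvPriority_mem x with hp | hp | hp | hp <;>
      simp [pvBucketStep, pvPriorityAlt_eq, hp, ih, pvF_cons, List.append_assoc]

-- ===== VERDICT (by name: the statement is the Claim_ definition above) =====
theorem sort_modules_by_learning_sequence_py_spec : Claim_equal_sort_modules_by_learning_sequence_py := by
  intro modules _
  unfold Spec_sort_modules_by_learning_sequence_py
  unfold sort_modules_by_learning_sequence_py sort_modules_by_learning_sequence_py_alt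
  rw [PySem.List.sorted_eq_foldl_insertBy]
  have hA := pv_foldl_ins modules [] [] [] [] (by simp) (by simp) (by simp) (by simp)
  simp only [List.nil_append] at hA
  rw [hA, pv_foldl_buckets modules [] [] [] []]
  simp [List.append_assoc]
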